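-- pv_equiv track=rewrite | github.com/GeminoLibi/Project_Revelare | revelare/utils/reporter.py | _generate_file_options
-- ===== SOURCE A (Python) =====
-- from typing import Dict, List, Any
--
-- def _generate_file_options(normalized_data: List[Dict[str, Any]]) -> str:
--     file_counts = {}
--     for item in normalized_data:
--          file_counts[item['file_source']] = file_counts.get(item['file_source'], 0) + 1
--
--     options = []
--     for file in sorted(file_counts.keys()):
--         options.append(f'<option value="{file}">{file} ({file_counts[file]})</option>')
--     return ''.join(options)
-- ===== SOURCE B (Python) =====
-- def _generate_file_options(normalized_data):
--     # Sort every item's key, then run-length scan consecutive equal keys,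
--     # emitting each group's option tag in the same pass (no counts dict).
--     keys = sorted(item['file_source'] for item in normalized_data)
--     parts = []
--     run_key, run_len = '', 0
--     for k in keys:
--         if run_len and k == run_key:
--             run_len += 1
--         else:
--             if run_len:
--                 parts.append(f'<option value="{run_key}">{run_key} ({run_len})</option>')
--             run_key, run_len = k, 1
--     if run_len:
--         parts.append(f'<option value="{run_key}">{run_key} ({run_len})</option>')
--     return ''.join(parts)
-- ===== Notes on version B (the rewrite author's own statement) =====
-- stated objective: alternative
-- what changed: Instead of building a counts dict over all items and then sorting its distinct keys, B sorts the full list of file_source keys and emits each option tag in one run-length pass over consecutive equal keys, maintaining no count table.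
import Mathlib
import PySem

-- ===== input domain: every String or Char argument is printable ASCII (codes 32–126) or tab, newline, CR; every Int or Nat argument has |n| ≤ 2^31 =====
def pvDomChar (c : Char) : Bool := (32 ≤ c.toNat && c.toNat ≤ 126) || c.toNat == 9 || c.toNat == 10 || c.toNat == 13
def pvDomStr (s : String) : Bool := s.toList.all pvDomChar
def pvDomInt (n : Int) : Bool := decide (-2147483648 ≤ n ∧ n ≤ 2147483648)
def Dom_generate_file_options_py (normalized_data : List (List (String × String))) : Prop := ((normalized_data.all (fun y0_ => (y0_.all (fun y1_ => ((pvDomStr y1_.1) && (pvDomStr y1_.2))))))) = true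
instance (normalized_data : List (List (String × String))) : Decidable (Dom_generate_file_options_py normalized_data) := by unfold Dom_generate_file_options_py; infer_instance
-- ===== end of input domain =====

-- B sorts every item's key and counts runs in one grouped pass instead of maintaining a
-- counts dict and sorting only its distinct keys; same return value, no side effects.

-- ===== PORT A =====
-- item['file_source'] (first match; total form — exact under Pre_, which demands the key)
def pvSrc (item : List (String × String)) : String :=
  (PySem.Dict.mk item).getD "file_source" ""

-- f'<option value="{file}">{file} ({count})</option>' (both Pythons format the same tag)
def pvOpt (file : String) (count : Int) : String :=
  PySem.Str.join "" ["<option value=\"", file, "\">", file, " (", PySem.Int.toStr count, ")</option>"]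

def generate_file_options_py (normalized_data : List (List (String × String))) : String :=
  let file_counts : PySem.Dict String Int :=
    normalized_data.foldl (fun d item => d.modify (pvSrc item) 0 (· + 1)) PySem.Dict.empty
  let options : List String :=
    (PySem.List.sorted file_counts.keys (fun x => x) false).foldl
      (fun acc file => acc ++ [pvOpt file (file_counts.getD file 0)]) []
  PySem.Str.join "" options

-- ===== PORT B =====
-- loop body: 'if run_len and k == run_key: … else: …' on state (parts, run_key, run_len)
def pvStep (acc : List String × String × Int) (k : String) : List String × String × Int :=
  if acc.2.2 ≠ 0 ∧ k = acc.2.1 then (acc.1, acc.2.1, acc.2.2 + 1)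
  else ((if acc.2.2 ≠ 0 then acc.1 ++ [pvOpt acc.2.1 acc.2.2] else acc.1), k, 1)

-- the trailing 'if run_len: parts.append(…)'
def pvFinish (acc : List String × String × Int) : List String :=
  if acc.2.2 ≠ 0 then acc.1 ++ [pvOpt acc.2.1 acc.2.2] else acc.1

def generate_file_options_py_alt (normalized_data : List (List (String × String))) : String :=
  let keys := PySem.List.sorted (normalized_data.map pvSrc) (fun x => x) false
  PySem.Str.join "" (pvFinish (keys.foldl pvStep ([], "", 0)))

-- ===== PRECONDITION & SPEC =====
-- Pre_ excludes exactly the items lacking a 'file_source' key, on which the Python A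
-- (and B alike) raises KeyError.
def Pre_generate_file_options_py (normalized_data : List (List (String × String))) : Prop :=
  ∀ item ∈ normalized_data, (PySem.Dict.mk item).contains "file_source" = true
instance (normalized_data : List (List (String × String))) : Decidable (Pre_generate_file_options_py normalized_data) := by unfold Pre_generate_file_options_py; infer_instance
def pvWitness_generate_file_options_py : (List (List (String × String))) :=
  [[("file_source", "a.txt")], [("file_source", "b.txt")], [("file_source", "a.txt")]]
def Spec_generate_file_options_py (normalized_data : List (List (String × String))) (out : String) : Prop := out = generate_file_options_py_alt normalized_data
instance (normalized_data : List (List (String × String))) (out : String) : Decidable (Spec_generate_file_options_py normalized_data out) := by unfold Spec_generate_file_options_py; infer_instance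

-- ===== CLAIM (what is proved, stated in full; the proofs are below) =====
def Claim_equal_generate_file_options_py : Prop := ∀ (normalized_data : List (List (String × String))), Dom_generate_file_options_py normalized_data → Pre_generate_file_options_py normalized_data → Spec_generate_file_options_py normalized_data (generate_file_options_py normalized_data)

-- ===== LEMMAS AND PROOFS =====

-- A's result: the sorted distinct keys, each tagged with its count in the key list.
theorem pvA_eq (nd : List (List (String × String))) :
    generate_file_options_py nd =
      PySem.Str.join ""
        ((PySem.List.sorted (PySem.Set.ofList (nd.map pvSrc)) (fun x => x) false).map
          (fun k => pvOpt k ((nd.map pvSrc).count k))) := by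
  unfold generate_file_options_py
  have hc : nd.foldl (fun d item => d.modify (pvSrc item) 0 (· + 1)) PySem.Dict.empty
      = PySem.Dict.counter (nd.map pvSrc) := by
    rw [PySem.Dict.counter_eq_foldl, List.foldl_map]
  simp only [hc, PySem.Dict.keys_counter, PySem.List.foldl_append_singleton_eq_map,
    PySem.Dict.getD_counter, List.nil_append]

-- the run-length recursion B's fold computes (on the already-sorted key list)
def pvGroups : List String → List String
  | [] => []
  | k :: t =>
      pvOpt k (1 + ((t.takeWhile (· == k)).length : Int)) :: pvGroups (t.dropWhile (· == k))
  termination_by l => l.length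
  decreasing_by
    simp only [List.length_cons]
    exact Nat.lt_succ_of_le (List.length_dropWhile_le _ _)

theorem pvFold_eq (S : List String) : ∀ (out : List String) (rk : String) (rl : Int), 0 < rl →
    pvFinish (S.foldl pvStep (out, rk, rl)) =
      out ++ pvOpt rk (rl + ((S.takeWhile (· == rk)).length : Int))
              :: pvGroups (S.dropWhile (· == rk)) := by
  induction S with
  | nil =>
      intro out rk rl hrl
      simp [pvFinish, pvGroups, Int.ne_of_gt hrl]
  | cons k t ih =>
      intro out rk rl hrl
      by_cases hk : k = rk
      · subst hk
        have hstep : pvStep (out, k, rl) k = (out, k, rl + 1) := by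
          simp [pvStep, Int.ne_of_gt hrl]
        rw [List.foldl_cons, hstep, ih out k (rl + 1) (by omega)]
        have harg : rl + 1 + ((t.takeWhile (· == k)).length : Int)
            = rl + (((k :: t).takeWhile (· == k)).length : Int) := by
          simp; ring
        rw [harg]
        simp
      · have hstep : pvStep (out, rk, rl) k = (out ++ [pvOpt rk rl], k, 1) := by
          simp [pvStep, hk, Int.ne_of_gt hrl]
        rw [List.foldl_cons, hstep, ih (out ++ [pvOpt rk rl]) k 1 (by omega)]
        have htw : (k :: t).takeWhile (· == rk) = [] := by
          simp [hk]
        have hdw : (k :: t).dropWhile (· == rk) = k :: t := by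
          simp [hk]
        rw [htw, hdw]
        show out ++ [pvOpt rk rl] ++ _ = _
        rw [pvGroups]
        simp

theorem pvB_eq_groups (nd : List (List (String × String))) :
    generate_file_options_py_alt nd =
      PySem.Str.join "" (pvGroups (PySem.List.sorted (nd.map pvSrc) (fun x => x) false)) := by
  unfold generate_file_options_py_alt
  cases hS : PySem.List.sorted (nd.map pvSrc) (fun x => x) false with
  | nil => simp [pvFinish, pvGroups]
  | cons k t =>
      have hstep : pvStep ([], "", 0) k = ([], k, 1) := by simp [pvStep]
      show PySem.Str.join "" (pvFinish (List.foldl pvStep ([], "", 0) (k :: t))) = _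
      rw [List.foldl_cons, hstep, pvFold_eq t [] k 1 (by omega), pvGroups]
      simp

theorem pvUpdate_run (k : String) (t2 : List String) : ∀ (t1 : List String),
    (∀ x ∈ t1, x = k) → PySem.Set.update [k] (t1 ++ t2) = PySem.Set.update [k] t2 := by
  intro t1
  induction t1 with
  | nil => intro _; rfl
  | cons x t1 ih =>
      intro hall
      have hx : x = k := hall x (by simp)
      rw [List.cons_append, PySem.Set.update_cons,
        PySem.Set.add_of_mem (by simp [hx]), ih (fun y hy => hall y (by simp [hy]))]

theorem pvGroups_sorted : ∀ (n : Nat) (S : List String), S.length ≤ n → S.Pairwise (· ≤ ·) →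
    pvGroups S = (PySem.Set.ofList S).map (fun k => pvOpt k ((S.count k : Int))) := by
  intro n
  induction n with
  | zero =>
      intro S hlen _
      have : S = [] := List.eq_nil_of_length_eq_zero (Nat.le_zero.mp hlen)
      simp [this, pvGroups, PySem.Set.ofList_nil]
  | succ n ih =>
      intro S hlen hsort
      cases S with
      | nil => simp [pvGroups, PySem.Set.ofList_nil]
      | cons k t =>
        have hsplit : t.takeWhile (· == k) ++ t.dropWhile (· == k) = t :=
          List.takeWhile_append_dropWhile
        have ht1k : ∀ x ∈ t.takeWhile (· == k), x = k := by
          intro x hx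
          simpa using List.mem_takeWhile_imp hx
        have hkle : ∀ x ∈ t, k ≤ x := (List.pairwise_cons.mp hsort).1
        have hsort_t : t.Pairwise (· ≤ ·) := (List.pairwise_cons.mp hsort).2
        have hsort2 : (t.dropWhile (· == k)).Pairwise (· ≤ ·) :=
          List.Pairwise.sublist (List.dropWhile_sublist _) hsort_t
        -- k does not occur after its run: the first survivor is ≠ k, later ones are ≥ it
        have hknot2 : k ∉ t.dropWhile (· == k) := by
          intro hk2
          cases ht2c : t.dropWhile (· == k) with
          | nil => rw [ht2c] at hk2; simp at hk2
          | cons h r =>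
            have hh : (h == k) = false := by
              have := List.head?_dropWhile_not (· == k) t
              rw [ht2c] at this
              simpa using this
            have hhk : h ≠ k := by simpa using hh
            have hht : h ∈ t :=
              List.Sublist.mem (by rw [ht2c]; exact List.mem_cons_self ..)
                (List.dropWhile_sublist _)
            have hhle : k ≤ h := hkle h hht
            rw [ht2c] at hk2
            rcases List.mem_cons.mp hk2 with h1 | h2
            · exact hhk h1.symm
            · have hle2 : h ≤ k := by
                rw [ht2c] at hsort2
                exact (List.pairwise_cons.mp hsort2).1 k h2
              exact hhk (le_antisymm hle2 hhle)
        -- counts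
        have hcnt1 : (t.takeWhile (· == k)).count k = (t.takeWhile (· == k)).length :=
          List.count_eq_length.mpr (fun b hb => (ht1k b hb).symm)
        have hcnt2 : (t.dropWhile (· == k)).count k = 0 := List.count_eq_zero.mpr hknot2
        have hcntt : t.count k = (t.takeWhile (· == k)).length := by
          conv_lhs => rw [← hsplit]
          rw [List.count_append, hcnt1, hcnt2]
          omega
        have hcntk : (k :: t).count k = (t.takeWhile (· == k)).length + 1 := by
          rw [List.count_cons_self, hcntt]
        -- the distinct keys: ofList (k :: t) = k :: ofList (dropWhile …)
        have hof : PySem.Set.ofList (k :: t) = k :: PySem.Set.ofList (t.dropWhile (· == k)) := by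
          have hadd : PySem.Set.add ([] : PySem.Set String) k = [k] := by
            rw [PySem.Set.add_of_not_mem (by simp)]; rfl
          have h1 : PySem.Set.ofList (k :: t)
              = PySem.Set.ofList (k :: t.dropWhile (· == k)) := by
            rw [← PySem.Set.update_nil_left, ← PySem.Set.update_nil_left,
              PySem.Set.update_cons, PySem.Set.update_cons, hadd]
            conv_lhs => rw [← hsplit]
            exact pvUpdate_run k _ _ ht1k
          rw [h1, PySem.Set.ofList_cons]
          have hrfl : (PySem.Set.ofList (t.dropWhile (· == k))).discard k
              = (PySem.Set.ofList (t.dropWhile (· == k))).filter (fun y => y != k) := rfl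
          rw [hrfl, List.filter_eq_self.mpr (fun a ha => by
            have ha2 : a ∈ t.dropWhile (· == k) := (PySem.Set.mem_ofList _ _).mp ha
            simp only [bne_iff_ne, ne_eq]
            intro heq
            exact hknot2 (heq ▸ ha2))]
        -- tail via the induction hypothesis
        have hlen2 : (t.dropWhile (· == k)).length ≤ n := by
          have := List.length_dropWhile_le (· == k) t
          simp only [List.length_cons] at hlen
          omega
        rw [pvGroups, ih _ hlen2 hsort2, hof, List.map_cons]
        have hhead : (1 : Int) + ((t.takeWhile (· == k)).length : Int)
            = (((k :: t).count k : Nat) : Int) := by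
          rw [hcntk]; push_cast; ring
        rw [hhead]
        have htail :
            (PySem.Set.ofList (t.dropWhile (· == k))).map
                (fun x => pvOpt x (((t.dropWhile (· == k)).count x : Nat) : Int))
              = (PySem.Set.ofList (t.dropWhile (· == k))).map
                (fun x => pvOpt x ((((k :: t).count x : Nat)) : Int)) := by
          refine List.map_congr_left (fun x hx => ?_)
          have hx2 : x ∈ t.dropWhile (· == k) := (PySem.Set.mem_ofList _ _).mp hx
          have hxk : x ≠ k := fun h => hknot2 (h ▸ hx2)
          have hxcnt : t.count x = (t.dropWhile (· == k)).count x := by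
            conv_lhs => rw [← hsplit]
            rw [List.count_append,
              List.count_eq_zero.mpr (fun h => hxk (ht1k x h) : x ∉ t.takeWhile (· == k))]
            omega
          rw [List.count_cons_of_ne hxk.symm, hxcnt]
        rw [htail]

theorem pvOfList_sublist {α : Type} [BEq α] [LawfulBEq α] (xs : List α) :
    (PySem.Set.ofList xs).Sublist xs := by
  induction xs with
  | nil => simp [PySem.Set.ofList_nil]
  | cons x xs ih =>
      rw [PySem.Set.ofList_cons]
      have h1 : (PySem.Set.ofList xs).discard x
          = (PySem.Set.ofList xs).filter (fun y => y != x) := rfl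
      rw [h1]
      exact List.Sublist.cons₂ x (List.Sublist.trans List.filter_sublist ih)

-- ===== VERDICT (by name: the statement is the Claim_ definition above) =====
theorem generate_file_options_py_spec : Claim_equal_generate_file_options_py := by
  intro nd _ _
  unfold Spec_generate_file_options_py
  have hsortS : (PySem.List.sorted (nd.map pvSrc) (fun x => x) false).Pairwise (· ≤ ·) :=
    PySem.List.sorted_pairwise (nd.map pvSrc) (fun x => x)
  have hperm : (PySem.List.sorted (nd.map pvSrc) (fun x => x) false).Perm (nd.map pvSrc) :=
    PySem.List.sorted_perm (nd.map pvSrc) (fun x => x) false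
  -- sorted distinct keys = the distinct elements of the sorted key list
  have hK : PySem.List.sorted (PySem.Set.ofList (nd.map pvSrc)) (fun x => x) false
      = PySem.Set.ofList (PySem.List.sorted (nd.map pvSrc) (fun x => x) false) := by
    apply PySem.List.sorted_eq_of_perm_of_pairwise_lt
    · refine (List.perm_ext_iff_of_nodup (PySem.Set.nodup_ofList _)
        (PySem.Set.nodup_ofList _)).mpr (fun a => ?_)
      rw [PySem.Set.mem_ofList, PySem.Set.mem_ofList]
      exact ⟨fun h => hperm.mem_iff.mp h, fun h => hperm.mem_iff.mpr h⟩
    · have hle : (PySem.Set.ofList (PySem.List.sorted (nd.map pvSrc)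
          (fun x => x) false)).Pairwise (· ≤ ·) :=
        List.Pairwise.sublist (pvOfList_sublist _) hsortS
      have hne : (PySem.Set.ofList (PySem.List.sorted (nd.map pvSrc)
          (fun x => x) false)).Pairwise (· ≠ ·) := PySem.Set.nodup_ofList _
      exact (hle.and hne).imp (fun h => lt_of_le_of_ne h.1 h.2)
  rw [pvA_eq, pvB_eq_groups,
    pvGroups_sorted (PySem.List.sorted (nd.map pvSrc) (fun x => x) false).length _
      le_rfl hsortS, hK]
  refine congrArg (PySem.Str.join "") (List.map_congr_left (fun x hx => ?_))
  rw [hperm.count_eq]
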